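-- pv_equiv track=rewrite | github.com/team401/2024-Robot-Code | util/secretary/secretary.py | is_one_check
-- ===== SOURCE A (Python) =====
-- NON_TRANSITIONS = ['default', 'Not allowed', 'TBD']
--
-- def is_one_check(row: list[str]) -> bool:
--     condition = ""
--     found_true = False
--     found_false = False
--
--     for transition in row[1:]:
--         if transition in NON_TRANSITIONS:
--             continue
--         if transition.startswith("!"):
--             if found_false:
--                 # We've already found one condition starting with `!`
--                 # This means this row can't be one check
--                 return False
--             elif found_true:
--                 if transition[1:] == condition:
--                     found_false = True
--                 else:
--                     # The `!...` condition doesn't match the `...` condition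
--                     # Can't be one check
--                     return False
--             else:
--                 found_false = True
--                 condition = transition[1:]
--         else:
--             if found_true:
--                 # We've already found one condition not starting with `!`
--                 # This means this row can't be one check
--                 return False
--             elif found_false:
--                 if transition == condition:
--                     found_true = True
--                 else:
--                     # The `!...` condition doesn't match the `...` condition
--                     # Can't be one check
--                     return False
--             else:
--                 found_true = True
--                 condition = transition
--
--     # If we found both a true and false without duplicates, it must be a one check
--     return found_true and found_false
-- ===== SOURCE B (Python) =====
-- NON_TRANSITIONS = ['default', 'Not allowed', 'TBD']
--
-- def is_one_check(row: list[str]) -> bool: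
--     items = [t for t in row[1:] if t not in NON_TRANSITIONS]
--     pos = [t for t in items if not t.startswith("!")]
--     neg = [t[1:] for t in items if t.startswith("!")]
--     return len(pos) == 1 and len(neg) == 1 and pos[0] == neg[0]
-- ===== Notes on version B (the rewrite author's own statement) =====
-- stated objective: simpler
-- what changed: Replaces A's early-exit state machine (condition/found_true/found_false flags) with a collect-then-validate form: filter out NON_TRANSITIONS, partition into positives and stripped negations, and accept iff there is exactly one of each and they are equal.
import Mathlib
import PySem

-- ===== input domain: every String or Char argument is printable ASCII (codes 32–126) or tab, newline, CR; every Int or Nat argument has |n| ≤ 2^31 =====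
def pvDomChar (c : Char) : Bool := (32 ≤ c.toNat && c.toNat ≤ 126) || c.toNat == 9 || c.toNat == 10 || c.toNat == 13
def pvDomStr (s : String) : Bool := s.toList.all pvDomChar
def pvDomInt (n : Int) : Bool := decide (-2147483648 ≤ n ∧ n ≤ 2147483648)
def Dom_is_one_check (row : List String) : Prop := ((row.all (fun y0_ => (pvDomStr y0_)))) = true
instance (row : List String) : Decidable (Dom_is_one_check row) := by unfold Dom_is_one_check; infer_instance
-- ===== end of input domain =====

-- B replaces A's early-exit state machine by a filter/partition collect-then-validate pass (objective: simpler).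

-- ===== PORT A =====
def pvNonTransitions : List String := ["default", "Not allowed", "TBD"]

def isOneCheckLoop : List String → String → Bool → Bool → Bool
  | [], _, ft, ff => ft && ff
  | t :: rest, cond, ft, ff =>
    if pvNonTransitions.contains t then isOneCheckLoop rest cond ft ff
    else if PySem.Str.startswith t "!" then
      if ff then false
      else if ft then
        if PySem.Str.slice t (some 1) none == cond then isOneCheckLoop rest cond ft true
        else false
      else isOneCheckLoop rest (PySem.Str.slice t (some 1) none) ft true
    else
      if ft then false
      else if ff then
        if t == cond then isOneCheckLoop rest cond true ff
        else false
      else isOneCheckLoop rest t true ff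

def is_one_check (row : List String) : Bool :=
  isOneCheckLoop (PySem.List.slice row (some 1) none) "" false false

-- ===== PORT B =====
def is_one_check_alt (row : List String) : Bool :=
  let items := (PySem.List.slice row (some 1) none).filter
    (fun t => !(pvNonTransitions.contains t))
  let pos := items.filter (fun t => !(PySem.Str.startswith t "!"))
  let neg := (items.filter (fun t => PySem.Str.startswith t "!")).map
    (fun t => PySem.Str.slice t (some 1) none)
  match pos, neg with
  | [p], [n] => p == n
  | _, _ => false

-- ===== PRECONDITION & SPEC =====
def Spec_is_one_check (row : List String) (out : Bool) : Prop := out = is_one_check_alt row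
instance (row : List String) (out : Bool) : Decidable (Spec_is_one_check row out) := by unfold Spec_is_one_check; infer_instance

-- ===== CLAIM (what is proved, stated in full; the proofs are below) =====
def Claim_equal_is_one_check : Prop := ∀ (row : List String), Dom_is_one_check row → Spec_is_one_check row (is_one_check row)

-- ===== LEMMAS AND PROOFS =====

-- B's positives of a list (after dropping NON_TRANSITIONS)
def pvPos (l : List String) : List String :=
  (l.filter (fun t => !(pvNonTransitions.contains t))).filter
    (fun t => !(PySem.Str.startswith t "!"))

-- B's stripped negation bases of a list
def pvNeg (l : List String) : List String :=
  ((l.filter (fun t => !(pvNonTransitions.contains t))).filter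
    (fun t => PySem.Str.startswith t "!")).map
    (fun t => PySem.Str.slice t (some 1) none)

-- value of state (found_true := false, found_false := false) expressed on B's lists
def stFF (ps ns : List String) : Bool :=
  match ps, ns with | [p], [n] => p == n | _, _ => false
def stTF (ps ns : List String) (cond : String) : Bool :=
  match ps, ns with | [], [n] => n == cond | _, _ => false
def stFT (ps ns : List String) (cond : String) : Bool :=
  match ps, ns with | [p], [] => p == cond | _, _ => false
def stTT (ps ns : List String) : Bool :=
  match ps, ns with | [], [] => true | _, _ => false

theorem pvPos_skip {t : String} (l : List String) (h : t ∈ pvNonTransitions) :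
    pvPos (t :: l) = pvPos l := by simp [pvPos, h]
theorem pvNeg_skip {t : String} (l : List String) (h : t ∈ pvNonTransitions) :
    pvNeg (t :: l) = pvNeg l := by simp [pvNeg, h]
theorem pvPos_neg {t : String} (l : List String) (h1 : t ∉ pvNonTransitions)
    (h2 : PySem.Str.startswith t "!" = true) : pvPos (t :: l) = pvPos l := by
  simp at h2; simp [pvPos, h1, h2]
theorem pvNeg_neg {t : String} (l : List String) (h1 : t ∉ pvNonTransitions)
    (h2 : PySem.Str.startswith t "!" = true) :
    pvNeg (t :: l) = PySem.Str.slice t (some 1) none :: pvNeg l := by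
  simp at h2; simp [pvNeg, h1, h2]
theorem pvPos_pos {t : String} (l : List String) (h1 : t ∉ pvNonTransitions)
    (h2 : PySem.Str.startswith t "!" = false) : pvPos (t :: l) = t :: pvPos l := by
  simp at h2; simp [pvPos, h1, h2]
theorem pvNeg_pos {t : String} (l : List String) (h1 : t ∉ pvNonTransitions)
    (h2 : PySem.Str.startswith t "!" = false) : pvNeg (t :: l) = pvNeg l := by
  simp at h2; simp [pvNeg, h1, h2]

-- the state-machine invariant: each loop state computes a shape predicate on B's lists
theorem loop_char (l : List String) : ∀ cond : String,
    isOneCheckLoop l cond false false = stFF (pvPos l) (pvNeg l) ∧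
    isOneCheckLoop l cond true false = stTF (pvPos l) (pvNeg l) cond ∧
    isOneCheckLoop l cond false true = stFT (pvPos l) (pvNeg l) cond ∧
    isOneCheckLoop l cond true true = stTT (pvPos l) (pvNeg l) := by
  induction l with
  | nil => intro cond; simp [isOneCheckLoop, pvPos, pvNeg, stFF, stTF, stFT, stTT]
  | cons t rest ih =>
    intro cond
    by_cases h1 : t ∈ pvNonTransitions
    · have hc : pvNonTransitions.contains t = true := by simp [h1]
      simp only [isOneCheckLoop, hc, if_true, pvPos_skip rest h1, pvNeg_skip rest h1]
      exact ih cond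
    · have hc : pvNonTransitions.contains t = false := by simp [h1]
      by_cases h2 : PySem.Str.startswith t "!" = true
      · -- negated transition
        simp only [isOneCheckLoop, hc, h2, Bool.false_eq_true, if_false, if_true,
          pvPos_neg rest h1 h2, pvNeg_neg rest h1 h2]
        refine ⟨?_, ?_, ?_, ?_⟩
        · rw [(ih (PySem.Str.slice t (some 1) none)).2.2.1]
          rcases pvPos rest with _ | ⟨p, _ | ⟨q, ps⟩⟩ <;>
            rcases pvNeg rest with _ | ⟨n, ns⟩ <;> simp [stFF, stFT]
        · by_cases h3 : PySem.Str.slice t (some 1) none = cond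
          · have hb : (PySem.Str.slice t (some 1) none == cond) = true := by simp [h3]
            rw [if_pos hb, (ih cond).2.2.2]
            cases pvPos rest <;> cases pvNeg rest <;> simp [stTF, stTT, h3]
          · have hb : (PySem.Str.slice t (some 1) none == cond) = false := by simp [h3]
            simp only [hb, Bool.false_eq_true, if_false]
            cases pvPos rest <;> cases pvNeg rest <;> simp [stTF, h3]
        · cases pvPos rest <;> cases pvNeg rest <;> simp [stFT]
        · cases pvPos rest <;> cases pvNeg rest <;> simp [stTT]
      · -- positive transition
        rw [Bool.not_eq_true] at h2
        simp only [isOneCheckLoop, hc, h2, Bool.false_eq_true, if_false,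
          pvPos_pos rest h1 h2, pvNeg_pos rest h1 h2]
        refine ⟨?_, ?_, ?_, ?_⟩
        · rw [(ih t).2.1]
          rcases pvPos rest with _ | ⟨p, ps⟩ <;>
            rcases pvNeg rest with _ | ⟨n, _ | ⟨m, ns⟩⟩ <;> simp [stFF, stTF, eq_comm]
        · cases pvPos rest <;> cases pvNeg rest <;> simp [stTF]
        · by_cases h3 : t = cond
          · have hb : (t == cond) = true := by simp [h3]
            rw [if_pos hb, (ih cond).2.2.2]
            cases pvPos rest <;> cases pvNeg rest <;> simp [stFT, stTT, h3]
          · have hb : (t == cond) = false := by simp [h3]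
            simp only [hb, Bool.false_eq_true, if_false]
            cases pvPos rest <;> cases pvNeg rest <;> simp [stFT, h3]
        · cases pvPos rest <;> cases pvNeg rest <;> simp [stTT]

-- ===== VERDICT (by name: the statement is the Claim_ definition above) =====
theorem is_one_check_spec : Claim_equal_is_one_check := by
  intro row _
  unfold Spec_is_one_check is_one_check is_one_check_alt
  rw [(loop_char (PySem.List.slice row (some 1) none) "").1]
  rfl
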